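-- pv_equiv track=rewrite | github.com/thameem-abbas/auto-tuning-vllm | src/serving/vllm_server.py | build_vllm_command
-- ===== SOURCE A (Python) =====
-- def build_vllm_command(model_name, port, candidate_flags):
--     cmd = [
--         "vllm",
--         "serve",
--         model_name,
--         "--max-model-len", "8192",
--         "--port", str(port),
--         "--disable-log-requests",
--         "--tensor-parallel-size", "1"
--     ]
--
--     # Check if we need to add --enable-chunked-prefill based on --max-num-partial-prefills
--     max_partial_prefills_value = None
--     has_enable_chunked_prefill = False
--
--     i = 0
--     while i < len(candidate_flags):
--         flag = candidate_flags[i]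
--
--         if flag == "--enable-chunked-prefill" or flag.startswith("--enable-chunked-prefill="):
--             has_enable_chunked_prefill = True
--
--         elif flag == "--max-num-partial-prefills":
--             if i + 1 < len(candidate_flags):
--                 try:
--                     max_partial_prefills_value = int(candidate_flags[i + 1])
--                 except ValueError:
--                     pass
--         elif flag.startswith("--max-num-partial-prefills="):
--             try:
--                 value_str = flag.split("=", 1)[1]
--                 max_partial_prefills_value = int(value_str)
--             except (ValueError, IndexError):
--                 pass
--
--         i += 1
--
--     if max_partial_prefills_value is not None and max_partial_prefills_value > 1 and not has_enable_chunked_prefill: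
--         cmd.append("--enable-chunked-prefill")
--
--     cmd += candidate_flags
--     return cmd
-- ===== SOURCE B (Python) =====
-- def build_vllm_command(model_name, port, candidate_flags):
--     cmd = [
--         "vllm",
--         "serve",
--         model_name,
--         "--max-model-len", "8192",
--         "--port", str(port),
--         "--disable-log-requests",
--         "--tensor-parallel-size", "1"
--     ]
--
--     # Pass 1: is chunked prefill already requested?
--     has_enable_chunked_prefill = any(
--         f == "--enable-chunked-prefill" or f.startswith("--enable-chunked-prefill=")
--         for f in candidate_flags
--     )
--
--     # Pass 2: scan backwards; the first flag that parses is the last one forward.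
--     max_partial_prefills_value = None
--     for i in range(len(candidate_flags) - 1, -1, -1):
--         f = candidate_flags[i]
--         if f == "--max-num-partial-prefills" and i + 1 < len(candidate_flags):
--             try:
--                 max_partial_prefills_value = int(candidate_flags[i + 1])
--                 break
--             except ValueError:
--                 pass
--         elif f.startswith("--max-num-partial-prefills="):
--             try:
--                 max_partial_prefills_value = int(f.split("=", 1)[1])
--                 break
--             except (ValueError, IndexError):
--                 pass
--
--     if max_partial_prefills_value is not None and max_partial_prefills_value > 1 and not has_enable_chunked_prefill:
--         cmd.append("--enable-chunked-prefill")
--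
--     cmd += candidate_flags
--     return cmd
-- ===== Notes on version B (the rewrite author's own statement) =====
-- stated objective: simpler
-- what changed: Replaces A's single combined index-threading while-loop (two mutable accumulators) with two independent passes: an any() scan for --enable-chunked-prefill and a reverse scan that breaks at the first flag that parses as an int (= A's last successful parse).
import Mathlib
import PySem

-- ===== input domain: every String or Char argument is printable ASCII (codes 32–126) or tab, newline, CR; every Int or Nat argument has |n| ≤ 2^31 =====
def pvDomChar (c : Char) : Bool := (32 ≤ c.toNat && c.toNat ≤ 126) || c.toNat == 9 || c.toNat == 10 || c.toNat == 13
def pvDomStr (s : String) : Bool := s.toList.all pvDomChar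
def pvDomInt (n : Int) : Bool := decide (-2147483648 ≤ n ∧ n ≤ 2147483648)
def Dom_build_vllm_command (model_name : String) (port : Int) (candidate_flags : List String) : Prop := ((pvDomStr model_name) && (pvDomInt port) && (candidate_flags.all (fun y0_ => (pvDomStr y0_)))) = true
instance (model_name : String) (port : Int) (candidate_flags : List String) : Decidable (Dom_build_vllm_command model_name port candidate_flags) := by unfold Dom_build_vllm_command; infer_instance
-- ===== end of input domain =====

-- B replaces A's single combined while-loop by two independent passes (an any() scan and a
-- reverse break-on-first-parse scan); objective: simpler. Return values only; neither mutates inputs.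

-- ===== PORT A =====
-- A's while-loop over index i threading (max_partial_prefills_value, has_enable_chunked_prefill).
-- flags[i] with i < len is exact as flags.getD i ""; try/except int(...) is the match on ofStr?.
def pvLoopA (flags : List String) (i : Nat) (v : Option Int) (h : Bool) : Option Int × Bool :=
  if _hlt : i < flags.length then
    let flag := flags.getD i ""
    if flag == "--enable-chunked-prefill" || PySem.Str.startswith flag "--enable-chunked-prefill=" then
      pvLoopA flags (i+1) v true
    else if flag == "--max-num-partial-prefills" then
      if i + 1 < flags.length then
        match PySem.Int.ofStr? (flags.getD (i+1) "") with
        | some n => pvLoopA flags (i+1) (some n) h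
        | none   => pvLoopA flags (i+1) v h      -- ValueError: pass
      else pvLoopA flags (i+1) v h
    else if PySem.Str.startswith flag "--max-num-partial-prefills=" then
      match (PySem.Str.splitMax? flag "=" 1).bind (fun ps => PySem.List.pyGet? ps 1) with
      | some value_str =>
        match PySem.Int.ofStr? value_str with
        | some n => pvLoopA flags (i+1) (some n) h
        | none   => pvLoopA flags (i+1) v h      -- ValueError: pass
      | none => pvLoopA flags (i+1) v h          -- IndexError: pass
    else pvLoopA flags (i+1) v h
  else (v, h)
termination_by flags.length - i

def build_vllm_command (model_name : String) (port : Int) (candidate_flags : List String) : List String :=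
  let cmd := ["vllm", "serve", model_name, "--max-model-len", "8192", "--port",
              PySem.Int.toStr port, "--disable-log-requests", "--tensor-parallel-size", "1"]
  match pvLoopA candidate_flags 0 none false with
  | (v, h) =>
    (if (match v with | some n => decide (1 < n) | none => false) && !h then
        cmd ++ ["--enable-chunked-prefill"]
      else cmd) ++ candidate_flags

-- ===== PORT B =====
-- B's pass 2: for i in range(len-1, -1, -1), break on the first successful parse.
def pvRevVal (flags : List String) : Nat → Option Int
  | 0 => none
  | n+1 =>
    let f := flags.getD n ""
    if f == "--max-num-partial-prefills" && decide (n + 1 < flags.length) then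
      match PySem.Int.ofStr? (flags.getD (n+1) "") with
      | some k => some k                         -- break
      | none   => pvRevVal flags n               -- ValueError: pass
    else if PySem.Str.startswith f "--max-num-partial-prefills=" then
      match ((PySem.Str.splitMax? f "=" 1).bind (fun ps => PySem.List.pyGet? ps 1)).bind PySem.Int.ofStr? with
      | some k => some k                         -- break
      | none   => pvRevVal flags n               -- ValueError/IndexError: pass
    else pvRevVal flags n

def build_vllm_command_alt (model_name : String) (port : Int) (candidate_flags : List String) : List String :=
  let cmd := ["vllm", "serve", model_name, "--max-model-len", "8192", "--port",
              PySem.Int.toStr port, "--disable-log-requests", "--tensor-parallel-size", "1"]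
  let h := candidate_flags.any (fun f =>
      f == "--enable-chunked-prefill" || PySem.Str.startswith f "--enable-chunked-prefill=")
  let v := pvRevVal candidate_flags candidate_flags.length
  (if (match v with | some n => decide (1 < n) | none => false) && !h then
      cmd ++ ["--enable-chunked-prefill"]
    else cmd) ++ candidate_flags

-- ===== PRECONDITION & SPEC =====
def Spec_build_vllm_command (model_name : String) (port : Int) (candidate_flags : List String) (out : List String) : Prop := out = build_vllm_command_alt model_name port candidate_flags
instance (model_name : String) (port : Int) (candidate_flags : List String) (out : List String) : Decidable (Spec_build_vllm_command model_name port candidate_flags out) := by unfold Spec_build_vllm_command; infer_instance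

-- ===== CLAIM (what is proved, stated in full; the proofs are below) =====
def Claim_equal_build_vllm_command : Prop := ∀ (model_name : String) (port : Int) (candidate_flags : List String), Dom_build_vllm_command model_name port candidate_flags → Spec_build_vllm_command model_name port candidate_flags (build_vllm_command model_name port candidate_flags)

-- ===== LEMMAS AND PROOFS =====

-- proof-side characterisation of one loop step's "parse attempt at index n"
def pvChunk (f : String) : Bool :=
  f == "--enable-chunked-prefill" || PySem.Str.startswith f "--enable-chunked-prefill="

def pvSucc (flags : List String) (n : Nat) : Option Int :=
  if flags.getD n "" == "--max-num-partial-prefills" && decide (n + 1 < flags.length) then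
    PySem.Int.ofStr? (flags.getD (n+1) "")
  else if PySem.Str.startswith (flags.getD n "") "--max-num-partial-prefills=" then
    ((PySem.Str.splitMax? (flags.getD n "") "=" 1).bind (fun ps => PySem.List.pyGet? ps 1)).bind PySem.Int.ofStr?
  else none

-- last successful parse among indices [i, n)
def pvLast (flags : List String) (i n : Nat) : Option Int :=
  if _h : i < n then
    match pvLast flags (i+1) n with
    | some k => some k
    | none   => pvSucc flags i
  else none
termination_by n - i

def pvAnyC (flags : List String) (i : Nat) : Bool :=
  if _h : i < flags.length then pvChunk (flags.getD i "") || pvAnyC flags (i+1) else false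
termination_by flags.length - i

lemma pvChunk_succ_none (flags : List String) (i : Nat)
    (hc : pvChunk (flags.getD i "") = true) : pvSucc flags i = none := by
  unfold pvChunk at hc
  unfold pvSucc
  rcases Bool.or_eq_true_iff.mp hc with h1 | h2
  · have he : flags.getD i "" = "--enable-chunked-prefill" := eq_of_beq h1
    have e1 : ("--enable-chunked-prefill" == "--max-num-partial-prefills") = false := by decide
    have e2 : PySem.Str.startswith "--enable-chunked-prefill" "--max-num-partial-prefills=" = false := by
      decide
    rw [he, e1, e2]
    simp
  · have hp : ("--enable-chunked-prefill=").toList <+: (flags.getD i "").toList := by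
      have h2' := h2
      rw [PySem.Str.startswith_eq] at h2'
      exact (PySem.Chars.startswith_iff _ _).mp h2'
    have hne : (flags.getD i "" == "--max-num-partial-prefills") = false := by
      rw [Bool.eq_false_iff]
      intro hb
      have hf : flags.getD i "" = "--max-num-partial-prefills" := eq_of_beq hb
      rw [hf] at hp
      revert hp; decide
    have hns : PySem.Str.startswith (flags.getD i "") "--max-num-partial-prefills=" = false := by
      rw [Bool.eq_false_iff]
      intro hb
      have hp2 : ("--max-num-partial-prefills=").toList <+: (flags.getD i "").toList := by
        rw [PySem.Str.startswith_eq] at hb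
        exact (PySem.Chars.startswith_iff _ _).mp hb
      rcases List.prefix_or_prefix_of_prefix hp hp2 with h | h
      · revert h; decide
      · revert h; decide
    rw [hne, hns]
    simp

lemma pvLoopA_eq (flags : List String) (i : Nat) (v : Option Int) (h : Bool) :
    pvLoopA flags i v h =
      ((match pvLast flags i flags.length with | some k => some k | none => v),
        h || pvAnyC flags i) := by
  induction' hind : flags.length - i using Nat.strong_induction_on with m IH generalizing i v h
  by_cases hi : i < flags.length
  · have hstep : ∀ v' h', pvLoopA flags (i+1) v' h' =
        ((match pvLast flags (i+1) flags.length with | some k => some k | none => v'),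
          h' || pvAnyC flags (i+1)) := by
      intro v' h'
      exact IH (flags.length - (i+1)) (by omega) (i+1) v' h' rfl
    have hlast : pvLast flags i flags.length =
        (match pvLast flags (i+1) flags.length with | some k => some k | none => pvSucc flags i) := by
      rw [pvLast]; simp [hi]
    have hany : pvAnyC flags i = (pvChunk (flags.getD i "") || pvAnyC flags (i+1)) := by
      rw [pvAnyC]; simp [hi]
    rw [pvLoopA]
    simp only [hi, dite_true]
    by_cases hc : pvChunk (flags.getD i "") = true
    · have hs := pvChunk_succ_none flags i hc
      have hcb : ((flags.getD i "" == "--enable-chunked-prefill") ||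
          PySem.Str.startswith (flags.getD i "") "--enable-chunked-prefill=") = true := hc
      simp only [hcb, if_true, hstep, hlast, hs, hany, hc]
      cases pvLast flags (i+1) flags.length <;> simp
    · have hcb : ((flags.getD i "" == "--enable-chunked-prefill") ||
          PySem.Str.startswith (flags.getD i "") "--enable-chunked-prefill=") = false := by
        simpa [pvChunk] using hc
      have hany' : pvAnyC flags i = pvAnyC flags (i+1) := by
        rw [hany]; simp at hcb; simp [pvChunk, hcb]
      simp only [hcb]
      by_cases ht : (flags.getD i "" == "--max-num-partial-prefills") = true
      · have hsucc : pvSucc flags i =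
            (if i + 1 < flags.length then PySem.Int.ofStr? (flags.getD (i+1) "") else none) := by
          unfold pvSucc
          by_cases hr : i + 1 < flags.length
          · rw [if_pos (by rw [ht]; simp [hr]), if_pos hr]
          · have hf : flags.getD i "" = "--max-num-partial-prefills" := eq_of_beq ht
            have e2 : PySem.Str.startswith "--max-num-partial-prefills" "--max-num-partial-prefills=" = false := by decide
            rw [if_neg (by simp [hr]), hf, e2]
            simp [hr]
        simp only [ht, if_true]
        by_cases hr : i + 1 < flags.length
        · simp only [hr, if_true]
          cases hparse : PySem.Int.ofStr? (flags.getD (i+1) "") with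
          | some n =>
            simp only [hstep, hlast, hsucc, hr, if_true, hparse, hany']
            cases pvLast flags (i+1) flags.length <;> simp
          | none =>
            simp only [hstep, hlast, hsucc, hr, if_true, hparse, hany']
            cases pvLast flags (i+1) flags.length <;> simp
        · simp only [hr, if_false]
          simp only [hstep, hlast, hsucc, hr, if_false, hany']
          cases pvLast flags (i+1) flags.length <;> simp
      · have htb : (flags.getD i "" == "--max-num-partial-prefills") = false := by
          revert ht; cases (flags.getD i "" == "--max-num-partial-prefills") <;> simp
        simp only [htb]
        by_cases hsw : PySem.Str.startswith (flags.getD i "") "--max-num-partial-prefills=" = true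
        · have hsucc : pvSucc flags i =
              ((PySem.Str.splitMax? (flags.getD i "") "=" 1).bind
                (fun ps => PySem.List.pyGet? ps 1)).bind PySem.Int.ofStr? := by
            unfold pvSucc
            rw [if_neg (by rw [htb]; simp), if_pos hsw]
          simp only [hsw, if_true]
          cases hsp : (PySem.Str.splitMax? (flags.getD i "") "=" 1).bind
              (fun ps => PySem.List.pyGet? ps 1) with
          | some vs =>
            cases hparse : PySem.Int.ofStr? vs with
            | some n =>
              simp only [hstep, hlast, hsucc, hsp, Option.bind_some, hparse, hany']
              cases pvLast flags (i+1) flags.length <;> simp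
            | none =>
              simp only [hstep, hlast, hsucc, hsp, Option.bind_some, hparse, hany']
              cases pvLast flags (i+1) flags.length <;> simp
          | none =>
            simp only [hstep, hlast, hsucc, hsp, Option.bind_none, hany']
            cases pvLast flags (i+1) flags.length <;> simp
        · have hswb : PySem.Str.startswith (flags.getD i "") "--max-num-partial-prefills=" = false := by
            revert hsw; cases PySem.Str.startswith (flags.getD i "") "--max-num-partial-prefills=" <;> simp
          have hsucc : pvSucc flags i = none := by
            unfold pvSucc
            rw [if_neg (by rw [htb]; simp), if_neg (by rw [hswb]; simp)]
          simp only [hswb]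
          simp only [hstep, hlast, hsucc, hany']
          cases pvLast flags (i+1) flags.length <;> simp
  · rw [pvLoopA, pvLast, pvAnyC]
    simp [hi]

lemma pvLast_peel_back (flags : List String) (i n : Nat) (hin : i ≤ n) :
    pvLast flags i (n+1) =
      (match pvSucc flags n with | some k => some k | none => pvLast flags i n) := by
  induction' hind : n - i using Nat.strong_induction_on with m IH generalizing i
  by_cases hlt : i < n
  · rw [pvLast]
    simp only [show i < n + 1 by omega, dite_true]
    rw [IH (n - (i+1)) (by omega) (i+1) (by omega) rfl]
    have hlow : pvLast flags i n =
        (match pvLast flags (i+1) n with | some k => some k | none => pvSucc flags i) := by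
      rw [pvLast]; simp [hlt]
    rw [hlow]
    cases pvSucc flags n <;> cases pvLast flags (i+1) n <;> simp
  · have heq : i = n := by omega
    subst heq
    rw [pvLast]
    simp only [show i < i + 1 by omega, dite_true]
    have h1 : pvLast flags (i+1) (i+1) = none := by rw [pvLast]; simp
    have h2 : pvLast flags i i = none := by rw [pvLast]; simp
    rw [h1, h2]
    cases pvSucc flags i <;> simp

lemma pvRevVal_eq_pvLast (flags : List String) (n : Nat) :
    pvRevVal flags n = pvLast flags 0 n := by
  induction n with
  | zero => rw [pvRevVal, pvLast]; simp
  | succ n IH =>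
    rw [pvLast_peel_back flags 0 n (by omega), ← IH]
    simp only [pvRevVal]
    unfold pvSucc
    split_ifs with h1 h2
    · cases PySem.Int.ofStr? (flags.getD (n+1) "") <;> simp
    · cases ((PySem.Str.splitMax? (flags.getD n "") "=" 1).bind
        (fun ps => PySem.List.pyGet? ps 1)).bind PySem.Int.ofStr? <;> simp
    · simp

lemma pvAnyC_eq_any (flags : List String) (i : Nat) :
    pvAnyC flags i = (flags.drop i).any pvChunk := by
  induction' hind : flags.length - i using Nat.strong_induction_on with m IH generalizing i
  by_cases hi : i < flags.length
  · rw [pvAnyC]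
    rw [List.drop_eq_getElem_cons hi]
    simp only [hi, dite_true, List.any_cons]
    rw [IH (flags.length - (i+1)) (by omega) (i+1) rfl]
    congr 1
    simp [List.getD_eq_getElem?_getD, List.getElem?_eq_getElem hi]
  · rw [pvAnyC]
    have : flags.drop i = [] := List.drop_eq_nil_of_le (by omega)
    simp [hi, this]

lemma pvLoopA_main (flags : List String) :
    pvLoopA flags 0 none false =
      (pvRevVal flags flags.length,
        flags.any (fun f => f == "--enable-chunked-prefill" ||
          PySem.Str.startswith f "--enable-chunked-prefill=")) := by
  rw [pvLoopA_eq, pvRevVal_eq_pvLast, pvAnyC_eq_any, List.drop_zero]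
  cases pvLast flags 0 flags.length <;> (unfold pvChunk; simp)

-- ===== VERDICT (by name: the statement is the Claim_ definition above) =====
theorem build_vllm_command_spec : Claim_equal_build_vllm_command := by
  intro model_name port candidate_flags _
  unfold Spec_build_vllm_command
  unfold build_vllm_command build_vllm_command_alt
  rw [pvLoopA_main]
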